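-- pv_equiv track=rewrite | github.com/ray-quasar/autonomous | follow_gap/follow_gap/follow_gap_old.py | find_largest_gap
-- ===== SOURCE A (Python) =====
-- def find_largest_gap(ranges):
--     """Return the start and end indices of the largest contiguous segment (nonzero values)."""
--     gaps = []
--     gap_start = None
--     for i, distance in enumerate(ranges):
--         if distance > 0 and gap_start is None:
--             gap_start = i
--         elif distance == 0 and gap_start is not None:
--             gaps.append((gap_start, i - 1))
--             gap_start = None
--     if gap_start is not None:
--         gaps.append((gap_start, len(ranges) - 1))
--     if not gaps:
--         return (0, len(ranges) - 1)
--     largest_gap = max(gaps, key=lambda x: x[1] - x[0])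
--     return largest_gap
-- ===== SOURCE B (Python) =====
-- def _first_pos(block, base):
--     for v in block:
--         if v > 0:
--             return base
--         base += 1
--     return None
--
--
-- def find_largest_gap(ranges):
--     """Split the list at its zeros into blocks; each block whose first positive
--     entry exists yields a candidate segment (first positive index, block end)."""
--     cands = []
--     rest = ranges
--     base = 0
--     while rest:
--         z = next((k for k, v in enumerate(rest) if v == 0), len(rest))
--         j = _first_pos(rest[:z], base)
--         if j is not None:
--             cands.append((j, base + z - 1))
--         base += z + 1
--         rest = rest[z + 1:]
--     if not cands:
--         return (0, len(ranges) - 1)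
--     best = cands[0]
--     for c in cands[1:]:
--         if c[1] - c[0] > best[1] - best[0]:
--             best = c
--     return best
-- ===== Notes on version B (the rewrite author's own statement) =====
-- stated objective: alternative
-- what changed: A is a single-pass state machine carrying an optional open-segment start; B instead repeatedly splits the list at its first zero, extracts from each zero-free block the first positive index as a candidate (first positive, block end), and then picks the longest candidate with a plain running-best pass.
import Mathlib
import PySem

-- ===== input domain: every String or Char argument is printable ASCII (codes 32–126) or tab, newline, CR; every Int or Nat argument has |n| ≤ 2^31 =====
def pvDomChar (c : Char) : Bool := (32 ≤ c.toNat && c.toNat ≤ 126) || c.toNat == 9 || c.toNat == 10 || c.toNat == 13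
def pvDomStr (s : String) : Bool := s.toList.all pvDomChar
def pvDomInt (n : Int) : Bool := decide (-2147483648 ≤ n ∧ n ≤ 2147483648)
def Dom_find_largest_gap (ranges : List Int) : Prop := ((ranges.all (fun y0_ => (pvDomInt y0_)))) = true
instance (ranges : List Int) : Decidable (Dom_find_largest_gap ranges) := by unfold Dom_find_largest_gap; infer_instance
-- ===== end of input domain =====

-- B replaces A's single-pass open-segment state machine by a split-at-zeros block
-- decomposition with a separate running-best pass (objective: alternative).


-- ===== PORT A =====
-- loop body of A's 'for i, distance in enumerate(ranges)': state (gaps, gap_start)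
def aStep (st : List (Int × Int) × Option Int) (p : Int × Int) : List (Int × Int) × Option Int :=
  match st, p with
  | (gs, none), (i, d) => if d > 0 then (gs, some i) else (gs, none)
  | (gs, some s), (i, d) => if d = 0 then (gs ++ [(s, i - 1)], none) else (gs, some s)

def find_largest_gap (ranges : List Int) : Int × Int :=
  let r := (PySem.List.enumerate ranges).foldl aStep ([], none)
  let gaps := match r.2 with
    | some s => r.1 ++ [(s, (ranges.length : Int) - 1)]
    | none => r.1
  if gaps = [] then (0, (ranges.length : Int) - 1)
  else (PySem.List.max? gaps (fun x => x.2 - x.1)).getD (0, 0)  -- gaps ≠ [], so getD's default is never used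

-- ===== PORT B =====
-- B's helper _first_pos: index of the first positive entry of a block
def bFirstPos : List Int → Int → Option Int
  | [], _ => none
  | v :: rest, base => if v > 0 then some base else bFirstPos rest (base + 1)

-- B's while loop: split at the first zero, one candidate per block
def bSegs (rest : List Int) (base : Int) : List (Int × Int) :=
  match _h : rest with
  | [] => []
  | _ :: _ =>
    let z := (PySem.List.index? rest 0).getD rest.length   -- next((k for k,v in enumerate(rest) if v==0), len(rest))
    let cand : List (Int × Int) :=
      match bFirstPos (rest.take z) base with              -- rest[:z] (0 ≤ z ≤ len, so the slice is take)
      | some j => [(j, base + (z : Int) - 1)]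
      | none => []
    cand ++ bSegs (rest.drop (z + 1)) (base + (z : Int) + 1)
termination_by rest.length
decreasing_by subst _h; simp [List.length_drop]

def find_largest_gap_alt (ranges : List Int) : Int × Int :=
  match bSegs ranges 0 with
  | [] => (0, (ranges.length : Int) - 1)
  | c0 :: rest =>
    rest.foldl (fun best c => if c.2 - c.1 > best.2 - best.1 then c else best) c0

-- ===== PRECONDITION & SPEC =====
def Spec_find_largest_gap (ranges : List Int) (out : Int × Int) : Prop := out = find_largest_gap_alt ranges
instance (ranges : List Int) (out : Int × Int) : Decidable (Spec_find_largest_gap ranges out) := by unfold Spec_find_largest_gap; infer_instance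

-- ===== CLAIM (what is proved, stated in full; the proofs are below) =====
def Claim_equal_find_largest_gap : Prop := ∀ (ranges : List Int), Dom_find_largest_gap ranges → Spec_find_largest_gap ranges (find_largest_gap ranges)

-- ===== LEMMAS AND PROOFS =====

-- A's segment list when the state machine currently carries an open segment start s:
-- it closes at the next zero (or at the very end) and continues as bSegs.
def bOpen (rest : List Int) (base : Int) (s : Int) : List (Int × Int) :=
  let z := (PySem.List.index? rest 0).getD rest.length
  (s, base + (z : Int) - 1) :: bSegs (rest.drop (z + 1)) (base + (z : Int) + 1)

-- close A's final state into its gaps list (e = index one past the last element)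
def aFinal (p : List (Int × Int) × Option Int) (e : Int) : List (Int × Int) :=
  match p.2 with
  | some s => p.1 ++ [(s, e - 1)]
  | none => p.1

theorem index?_cons_ne (d : Int) (rest : List Int) (hd : d ≠ 0) :
    ((PySem.List.index? (d :: rest) 0).getD (d :: rest).length : Int)
      = ((PySem.List.index? rest 0).getD rest.length : Int) + 1 := by
  rw [PySem.List.index?_cons_of_ne rest hd]
  cases PySem.List.index? rest 0 <;> simp

theorem take_cons_of_ne (d : Int) (rest : List Int) (hd : d ≠ 0) :
    (d :: rest).take ((PySem.List.index? (d :: rest) 0).getD (d :: rest).length)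
      = d :: rest.take ((PySem.List.index? rest 0).getD rest.length) := by
  rw [PySem.List.index?_cons_of_ne rest hd]
  cases PySem.List.index? rest 0 <;> simp

theorem drop_cons_of_ne (d : Int) (rest : List Int) (hd : d ≠ 0) :
    (d :: rest).drop ((PySem.List.index? (d :: rest) 0).getD (d :: rest).length + 1)
      = rest.drop ((PySem.List.index? rest 0).getD rest.length + 1) := by
  rw [PySem.List.index?_cons_of_ne rest hd]
  cases PySem.List.index? rest 0 <;> simp

theorem bSegs_zero (rest : List Int) (base : Int) :
    bSegs (0 :: rest) base = bSegs rest (base + 1) := by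
  rw [bSegs.eq_2, PySem.List.index?_cons_self]
  simp [bFirstPos]

theorem bSegs_pos (d : Int) (rest : List Int) (base : Int) (hd : 0 < d) :
    bSegs (d :: rest) base = bOpen rest (base + 1) base := by
  have hne : d ≠ 0 := by omega
  rw [bSegs.eq_2, take_cons_of_ne d rest hne, drop_cons_of_ne d rest hne]
  simp only [bFirstPos, if_pos hd, bOpen]
  rw [index?_cons_ne d rest hne]
  ring_nf
  simp

theorem bSegs_neg (d : Int) (rest : List Int) (base : Int) (hd : d < 0) :
    bSegs (d :: rest) base = bSegs rest (base + 1) := by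
  have hne : d ≠ 0 := by omega
  rw [bSegs.eq_2, take_cons_of_ne d rest hne, drop_cons_of_ne d rest hne]
  simp only [bFirstPos, if_neg (by omega : ¬ (0:Int) < d)]
  rw [index?_cons_ne d rest hne]
  cases rest with
  | nil => simp [bSegs.eq_1, bFirstPos, PySem.List.index?]
  | cons r rs =>
    rw [bSegs.eq_2]
    cases hb : bFirstPos ((r :: rs).take ((PySem.List.index? (r :: rs) 0).getD (r :: rs).length)) (base + 1) with
    | none => simp; congr 1; ring
    | some j => simp; exact ⟨by ring, by congr 1; ring⟩

theorem bOpen_cons_zero (rest : List Int) (base s : Int) :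
    bOpen (0 :: rest) base s = (s, base - 1) :: bSegs rest (base + 1) := by
  simp only [bOpen]
  rw [PySem.List.index?_cons_self]
  simp

theorem bOpen_cons_ne (d : Int) (rest : List Int) (base s : Int) (hd : d ≠ 0) :
    bOpen (d :: rest) base s = bOpen rest (base + 1) s := by
  simp only [bOpen]
  rw [drop_cons_of_ne d rest hd, index?_cons_ne d rest hd]
  ring_nf

-- main invariant: A's fold from any start index equals B's block decomposition
theorem main_inv (rest : List Int) : ∀ (base : Int) (gs : List (Int × Int)),
    (aFinal ((PySem.List.enumerate rest base).foldl aStep (gs, none)) (base + rest.length)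
        = gs ++ bSegs rest base)
    ∧ ∀ s : Int,
      aFinal ((PySem.List.enumerate rest base).foldl aStep (gs, some s)) (base + rest.length)
        = gs ++ bOpen rest base s := by
  induction rest with
  | nil =>
    intro base gs
    constructor
    · simp [PySem.List.enumerate, aFinal, bSegs.eq_1]
    · intro s
      simp [PySem.List.enumerate, aFinal, bOpen, bSegs.eq_1, PySem.List.index?]
  | cons d rest ih =>
    intro base gs
    have hlen : (base + ((d :: rest).length : Int)) = (base + 1) + (rest.length : Int) := by
      simp; ring
    constructor
    · rw [PySem.List.enumerate_cons, List.foldl_cons, hlen]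
      by_cases hd : 0 < d
      · have : aStep (gs, none) (base, d) = (gs, some base) := by simp [aStep, hd]
        rw [this, (ih (base + 1) gs).2 base, bSegs_pos d rest base hd]
      · have : aStep (gs, none) (base, d) = (gs, none) := by simp [aStep, hd]
        rw [this, (ih (base + 1) gs).1]
        rcases lt_trichotomy d 0 with h | h | h
        · rw [bSegs_neg d rest base h]
        · subst h; rw [bSegs_zero]
        · omega
    · intro s
      rw [PySem.List.enumerate_cons, List.foldl_cons, hlen]
      by_cases hd : d = 0
      · subst hd
        have : aStep (gs, some s) (base, (0:Int)) = (gs ++ [(s, base - 1)], none) := by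
          simp [aStep]
        rw [this, (ih (base + 1) (gs ++ [(s, base - 1)])).1, bOpen_cons_zero]
        simp
      · have : aStep (gs, some s) (base, d) = (gs, some s) := by simp [aStep, hd]
        rw [this, (ih (base + 1) gs).2 s, bOpen_cons_ne d rest base s hd]

theorem max?_foldl (c : Int × Int) (t : List (Int × Int)) :
    (PySem.List.max? (c :: t) (fun x => x.2 - x.1)).getD (0, 0)
      = t.foldl (fun best x => if x.2 - x.1 > best.2 - best.1 then x else best) c := by
  induction t generalizing c with
  | nil => rfl
  | cons x t ih =>
    have h1 : PySem.List.max? (c :: x :: t) (fun y => y.2 - y.1)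
        = PySem.List.max? ((if x.2 - x.1 > c.2 - c.1 then x else c) :: t) (fun y => y.2 - y.1) := by
      simp only [PySem.List.max?, List.foldl_cons]
      congr 1
      by_cases h : c.2 - c.1 < x.2 - x.1 <;> simp [h, gt_iff_lt]
    rw [h1, ih]
    simp only [List.foldl_cons]

-- ===== VERDICT (by name: the statement is the Claim_ definition above) =====
theorem find_largest_gap_spec : Claim_equal_find_largest_gap := by
  intro ranges _
  unfold Spec_find_largest_gap
  have e1 : find_largest_gap ranges =
      (let gaps := aFinal ((PySem.List.enumerate ranges).foldl aStep ([], none)) (ranges.length : Int)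
       if gaps = [] then (0, (ranges.length : Int) - 1)
       else (PySem.List.max? gaps (fun x => x.2 - x.1)).getD (0, 0)) := rfl
  have h := (main_inv ranges 0 []).1
  rw [zero_add, List.nil_append] at h
  rw [e1]
  simp only [h]
  unfold find_largest_gap_alt
  cases hb : bSegs ranges 0 with
  | nil => simp
  | cons c0 t =>
    simp only [if_neg (by simp : ¬ (c0 :: t) = [])]
    rw [max?_foldl]
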